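-- pv_equiv track=rewrite | github.com/igavriel/PythonLearning | interview/bulls-cows.py | _validate_num
-- ===== SOURCE A (Python) =====
-- def _validate_num(num: int):
--     new_num = num
--     code_set = set()
--
--     for i in range(0,4):
--         digit = new_num%10
--         new_num = int(new_num/10)
--         if(digit not in code_set):
--             code_set.add(digit)
--             #pp(f"add {digit} to {code_set}")
--         else:
--             raise ValueError("duplicate digits")
--     return code_set
-- ===== SOURCE B (Python) =====
-- def _validate_num(num: int):
--     # closed-form: digit i is int(num / 10**i) % 10; validate with pairwise comparisons
--     a, b, c, d = (int(num / 10 ** i) % 10 for i in range(4))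
--     if a == b or a == c or a == d or b == c or b == d or c == d:
--         raise ValueError("duplicate digits")
--     return {a, b, c, d}
-- ===== Notes on version B (the rewrite author's own statement) =====
-- stated objective: alternative
-- what changed: Replaced A's stateful loop (running quotient, growing set, in-loop membership test with early raise) by closed-form extraction of each digit via truncated division by the i-th power of ten, validated by an explicit pairwise-comparison distinctness check with no set used for validation.
import Mathlib
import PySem

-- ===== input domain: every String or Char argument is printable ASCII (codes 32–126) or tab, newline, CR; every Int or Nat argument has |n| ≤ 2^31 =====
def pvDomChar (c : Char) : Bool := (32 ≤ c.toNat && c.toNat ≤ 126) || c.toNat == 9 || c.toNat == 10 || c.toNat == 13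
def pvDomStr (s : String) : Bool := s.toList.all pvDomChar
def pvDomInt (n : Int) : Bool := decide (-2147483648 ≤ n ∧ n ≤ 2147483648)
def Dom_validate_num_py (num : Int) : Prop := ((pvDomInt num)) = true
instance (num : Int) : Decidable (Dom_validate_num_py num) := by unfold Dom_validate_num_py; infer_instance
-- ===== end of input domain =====

-- B extracts each digit in closed form (truncated division by the i-th power of ten, then mod ten)
-- and checks distinctness by
-- explicit pairwise comparisons instead of A's stateful loop with an in-loop set-membership
-- test and early raise; same values wherever A returns (objective: alternative).
-- Python's float-based int(n / p) is ported as PySem.Int.truncdiv, exact for |n| ≤ 2^31 (Dom).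

-- ===== PORT A =====
-- loop 'for i in range(0,4)' with state (new_num, code_set); none = the ValueError branch
def validateLoopA : Nat → Int → PySem.Set Int → Option (PySem.Set Int)
  | 0, _, s => some s
  | Nat.succ k, n, s =>
    let digit := PySem.Int.mod n 10
    let n' := PySem.Int.truncdiv n 10
    if PySem.Set.contains s digit then none
    else validateLoopA k n' (PySem.Set.add s digit)

def validate_num_py (num : Int) : List Int :=
  (validateLoopA 4 num PySem.Set.empty).getD []

-- ===== PORT B =====
-- digits: generator over range(4), each digit by truncated division by a power of ten
def validate_num_py_alt (num : Int) : List Int :=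
  let ds := (PySem.List.pyRange 0 4 1).map
    (fun i => PySem.Int.mod (PySem.Int.truncdiv num ((10 : Int) ^ i.toNat)) 10)
  match ds with
  | [a, b, c, d] =>
    if a == b || a == c || a == d || b == c || b == d || c == d then []  -- the raise branch
    else PySem.Set.ofList [a, b, c, d]
  | _ => []  -- unreachable: range(4) yields four digits

-- ===== PRECONDITION & SPEC =====
-- Pre_ excludes exactly the inputs on which A raises ValueError: the four extracted
-- digits of num (successive truncated quotients) must be pairwise distinct.
def Pre_validate_num_py (num : Int) : Prop :=
  let n1 := PySem.Int.truncdiv num 10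
  let n2 := PySem.Int.truncdiv n1 10
  let n3 := PySem.Int.truncdiv n2 10
  List.Nodup [PySem.Int.mod num 10, PySem.Int.mod n1 10,
              PySem.Int.mod n2 10, PySem.Int.mod n3 10]
instance (num : Int) : Decidable (Pre_validate_num_py num) := by unfold Pre_validate_num_py; infer_instance
def pvWitness_validate_num_py : Int := (1234)

def Spec_validate_num_py (num : Int) (out : List Int) : Prop := out = validate_num_py_alt num
instance (num : Int) (out : List Int) : Decidable (Spec_validate_num_py num out) := by unfold Spec_validate_num_py; infer_instance

-- ===== CLAIM (what is proved, stated in full; the proofs are below) =====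
def Claim_equal_validate_num_py : Prop := ∀ (num : Int), Dom_validate_num_py num → Pre_validate_num_py num → Spec_validate_num_py num (validate_num_py num)

-- ===== LEMMAS AND PROOFS =====

-- truncation composes: (n tdiv a) tdiv b = n tdiv (a*b), for natural divisors
theorem tdiv_tdiv_nat (m a b : Nat) : ((m : Int).tdiv a).tdiv b = (m : Int).tdiv ((a * b : Nat) : Int) := by
  rw [← Int.ofNat_tdiv, ← Int.ofNat_tdiv, ← Int.ofNat_tdiv, Nat.div_div_eq_div_mul]

theorem tdiv_tdiv (n : Int) (a b : Nat) : (n.tdiv a).tdiv b = n.tdiv ((a * b : Nat) : Int) := by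
  obtain ⟨m, rfl | rfl⟩ := Int.eq_nat_or_neg n
  · exact tdiv_tdiv_nat m a b
  · rw [Int.neg_tdiv, Int.neg_tdiv, Int.neg_tdiv]
    exact congrArg Neg.neg (tdiv_tdiv_nat m a b)

-- ===== VERDICT (by name: the statement is the Claim_ definition above) =====
theorem validate_num_py_spec : Claim_equal_validate_num_py := by
  intro num _ hpre
  unfold Spec_validate_num_py validate_num_py validate_num_py_alt
  simp [Pre_validate_num_py, List.nodup_cons, not_or] at hpre
  obtain ⟨⟨h01, h02, h03⟩, ⟨h12, h13⟩, h23⟩ := hpre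
  simp only [PySem.Int.truncdiv] at h01 h02 h03 h12 h13 h23
  have e2 : (num.tdiv 10).tdiv 10 = num.tdiv 100 := by
    simpa using tdiv_tdiv num 10 10
  have e3 : ((num.tdiv 10).tdiv 10).tdiv 10 = num.tdiv 1000 := by
    rw [e2]; simpa using tdiv_tdiv num 100 10
  have hr : PySem.List.pyRange 0 4 1 = [0, 1, 2, 3] := by decide
  simp only [hr, List.map_cons, List.map_nil]
  norm_num [PySem.Int.truncdiv, Int.tdiv_one]
  rw [show ((10:Int) ^ Int.toNat 2) = 100 by rfl, show ((10:Int) ^ Int.toNat 3) = 1000 by rfl,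
      ← e2, ← e3]
  simp [validateLoopA, PySem.Set.empty, PySem.Set.ofList, PySem.Set.add,
    PySem.Set.contains, PySem.Int.truncdiv,
    h01, h02, h03, h12, h13, h23,
    Ne.symm h01, Ne.symm h02, Ne.symm h03, Ne.symm h12, Ne.symm h13, Ne.symm h23]
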